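-- pv_equiv track=rewrite | github.com/YashB63/GFG-Daily-Questions | Day 498/Temple Offerings/temple_offerings.py | offerings
-- ===== SOURCE A (Python) =====
-- def offerings(N, nums):
--     ans = []
--     ans.append(0)
--     for i in range(1,N):
--         if nums[i]>nums[i-1]:
--             ans.append(ans[-1]+1)
--         else:
--             ans.append(0)
--     sumA = 0
--     for i in range(N-2, -1, -1):
--         if nums[i]>nums[i+1]:
--             ans[i] = max(ans[i], ans[i+1]+1)
--         sumA += ans[i]+1
--     sumA += ans[N-1]+1
--     return sumA
-- ===== SOURCE B (Python) =====
-- def offerings(N, nums):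
--     # single pass with up/down/peak counters, O(1) extra space
--     total = 1
--     up = down = peak = 0
--     for i in range(1, N):
--         if nums[i] > nums[i-1]:
--             up += 1; down = 0; peak = up
--             total += 1 + up
--         elif nums[i] == nums[i-1]:
--             up = down = peak = 0
--             total += 1
--         else:
--             down += 1; up = 0
--             total += 1 + down - (1 if peak >= down else 0)
--     return total
-- ===== Notes on version B (the rewrite author's own statement) =====
-- stated objective: alternative
-- what changed: Replaces the two-pass array algorithm (forward ascent array, then a backward pass taking maxima with descent runs and summing) by the classic single forward pass that keeps only up/down/peak counters and corrects the running total on descents; O(1) extra space instead of an O(n) array.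
import Mathlib
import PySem

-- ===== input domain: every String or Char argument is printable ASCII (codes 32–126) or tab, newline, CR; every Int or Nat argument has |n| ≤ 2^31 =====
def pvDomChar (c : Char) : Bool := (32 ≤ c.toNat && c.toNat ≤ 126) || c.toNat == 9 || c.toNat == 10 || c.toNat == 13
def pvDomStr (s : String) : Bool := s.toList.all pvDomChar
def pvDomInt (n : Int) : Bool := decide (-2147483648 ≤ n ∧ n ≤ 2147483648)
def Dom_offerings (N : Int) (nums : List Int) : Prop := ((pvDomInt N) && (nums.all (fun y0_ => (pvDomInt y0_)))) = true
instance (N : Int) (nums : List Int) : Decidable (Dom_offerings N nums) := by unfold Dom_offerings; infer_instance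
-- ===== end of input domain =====

-- B replaces A's two passes over an O(n) candy array by the classic single forward
-- pass keeping only up/down/peak counters (O(1) extra space); same return value.

-- ===== PORT A =====
-- loop body of A's first pass (append ascent values, reading ans[-1])
def offeringsStepA1 (nums : List Int) (ans : List Int) (i : Int) : List Int :=
  if PySem.List.pyGetD nums i 0 > PySem.List.pyGetD nums (i - 1) 0 then
    ans ++ [PySem.List.pyGetD ans (-1) 0 + 1]
  else
    ans ++ [0]

-- loop body of A's backward pass over (ans, sumA)
def offeringsStepA2 (nums : List Int) (p : List Int × Int) (i : Int) : List Int × Int :=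
  let ans :=
    if PySem.List.pyGetD nums i 0 > PySem.List.pyGetD nums (i + 1) 0 then
      PySem.List.pySetD p.1 i
        (max (PySem.List.pyGetD p.1 i 0) (PySem.List.pyGetD p.1 (i + 1) 0 + 1))
    else p.1
  (ans, p.2 + PySem.List.pyGetD ans i 0 + 1)

def offerings (N : Int) (nums : List Int) : Int :=
  let ans : List Int := [0]
  let ans := (PySem.List.pyRange 1 N 1).foldl (offeringsStepA1 nums) ans
  let p := (PySem.List.pyRange (N - 2) (-1) (-1)).foldl (offeringsStepA2 nums) (ans, 0)
  p.2 + PySem.List.pyGetD p.1 (N - 1) 0 + 1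

-- ===== PORT B =====
-- loop body of B's single pass over (total, up, down, peak)
def offeringsStepB (nums : List Int) (st : Int × Int × Int × Int) (i : Int) : Int × Int × Int × Int :=
  if PySem.List.pyGetD nums i 0 > PySem.List.pyGetD nums (i - 1) 0 then
    (st.1 + (1 + (st.2.1 + 1)), st.2.1 + 1, 0, st.2.1 + 1)
  else if PySem.List.pyGetD nums i 0 = PySem.List.pyGetD nums (i - 1) 0 then
    (st.1 + 1, 0, 0, 0)
  else
    (st.1 + (1 + (st.2.2.1 + 1) - (if st.2.2.2 ≥ st.2.2.1 + 1 then 1 else 0)),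
     0, st.2.2.1 + 1, st.2.2.2)

def offerings_alt (N : Int) (nums : List Int) : Int :=
  ((PySem.List.pyRange 1 N 1).foldl (offeringsStepB nums) (1, 0, 0, 0)).1

-- ===== PRECONDITION & SPEC =====
-- Pre_ excludes exactly the inputs where the Python A raises IndexError:
-- N < 0 (ans[N-1] wraps out of range) or 2 ≤ N with fewer than N elements in nums.
def Pre_offerings (N : Int) (nums : List Int) : Prop :=
  0 ≤ N ∧ (N ≤ nums.length ∨ N ≤ 1)
instance (N : Int) (nums : List Int) : Decidable (Pre_offerings N nums) := by
  unfold Pre_offerings; infer_instance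

def pvWitness_offerings : Int × List Int := (3, [1, 2, 2])

def Spec_offerings (N : Int) (nums : List Int) (out : Int) : Prop := out = offerings_alt N nums
instance (N : Int) (nums : List Int) (out : Int) : Decidable (Spec_offerings N nums out) := by
  unfold Spec_offerings; infer_instance

-- ===== CLAIM (what is proved, stated in full; the proofs are below) =====
def Claim_equal_offerings : Prop := ∀ (N : Int) (nums : List Int), Dom_offerings N nums → Pre_offerings N nums → Spec_offerings N nums (offerings N nums)

-- ===== LEMMAS AND PROOFS =====

-- pvDepth prev l = length of the strictly descending run of l continuing downward from prev
def pvDepth (prev : Int) : List Int → Int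
  | [] => 0
  | x :: r => if x < prev then pvDepth x r + 1 else 0

-- pvIncs u prev l = the ascending-run values A's first pass appends for l, seeded by (u, prev)
def pvIncs (u prev : Int) : List Int → List Int
  | [] => []
  | x :: r => (if x > prev then u + 1 else 0) :: pvIncs (if x > prev then u + 1 else 0) x r

-- pvFins u prev l = the final array values after A's backward pass, on the suffix l
def pvFins (u prev : Int) : List Int → List Int
  | [] => []
  | x :: r => max (if x > prev then u + 1 else 0) (pvDepth x r)
      :: pvFins (if x > prev then u + 1 else 0) x r

-- pvS u prev l = Σ over l of (final value + 1)
def pvS (u prev : Int) : List Int → Int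
  | [] => 0
  | x :: r => max (if x > prev then u + 1 else 0) (pvDepth x r) + 1
      + pvS (if x > prev then u + 1 else 0) x r

-- pvM = B's loop body as a structural recursion (total increments only)
def pvM (u peak down prev : Int) : List Int → Int
  | [] => 0
  | x :: r =>
    if x > prev then 1 + (u + 1) + pvM (u + 1) (u + 1) 0 x r
    else if x = prev then 1 + pvM 0 0 0 x r
    else 1 + (down + 1) - (if peak ≥ down + 1 then 1 else 0) + pvM 0 peak (down + 1) x r

theorem pvDepth_nonneg (l : List Int) : ∀ (p : Int), 0 ≤ pvDepth p l := by
  induction l with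
  | nil => intro p; simp [pvDepth]
  | cons x r ih =>
    intro p
    simp only [pvDepth]
    split
    · have := ih x; omega
    · omega

theorem pvIncs_length (l : List Int) : ∀ u p, (pvIncs u p l).length = l.length := by
  induction l with
  | nil => intro u p; rfl
  | cons x r ih => intro u p; simp [pvIncs, ih]

theorem pvFins_length (l : List Int) : ∀ u p, (pvFins u p l).length = l.length := by
  induction l with
  | nil => intro u p; rfl
  | cons x r ih => intro u p; simp [pvFins, ih]

theorem pvS_fins (l : List Int) : ∀ u p, pvS u p l = (pvFins u p l).sum + l.length := by
  induction l with
  | nil => intro u p; rfl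
  | cons x r ih =>
    intro u p
    simp only [pvS, pvFins, List.sum_cons, List.length_cons, ih]
    push_cast
    ring

-- the single-pass correction invariant: B's eager total equals the final-candy sum
-- plus the pending adjustment of the virtual prefix run (down steps, peak seed)
theorem pvKey (l : List Int) : ∀ u peak down prev : Int, 0 ≤ u →
    pvM u peak down prev l
      = pvS u prev l + down * pvDepth prev l
        + (max peak (down + pvDepth prev l) - max peak down) := by
  induction l with
  | nil => intro u peak down prev _; simp [pvM, pvS, pvDepth]
  | cons x r ih =>
    intro u peak down prev hu
    have hD : 0 ≤ pvDepth x r := pvDepth_nonneg r x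
    by_cases h1 : x > prev
    · have hne : x ≠ prev := ne_of_gt h1
      have hlt : ¬ x < prev := by omega
      simp only [pvM, pvS, pvDepth, h1, hne, hlt, if_true, if_false]
      rw [ih (u + 1) (u + 1) 0 x (by omega)]
      have h2 : max (u + 1) 0 = u + 1 := by omega
      rw [h2]
      ring_nf
    · by_cases h2 : x = prev
      · have hlt : ¬ x < prev := by omega
        subst h2
        rw [pvM, pvS, pvDepth, if_neg h1, if_pos rfl, if_neg h1, if_neg h1,
          ih 0 0 0 x le_rfl]
        omega
      · have hlt : x < prev := by omega
        simp only [pvM, pvS, pvDepth, h1, h2, hlt, if_true, if_false]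
        rw [ih 0 peak (down + 1) x le_rfl]
        have hmul : (down + 1) * pvDepth x r = down * pvDepth x r + pvDepth x r := by ring
        have hmul2 : down * (pvDepth x r + 1) = down * pvDepth x r + down := by ring
        rw [hmul, hmul2]
        omega

theorem pvDropSucc {α : Type} (l : List α) (j : Int) (hj : 0 ≤ j) (x : α) (s : List α)
    (h : List.drop j.toNat l = x :: s) : List.drop (j + 1).toNat l = s := by
  have hn : (j + 1).toNat = j.toNat + 1 := by omega
  rw [hn, ← List.tail_drop, h]
  rfl

theorem pvNumsAt (nums : List Int) (N : Int) (hN : N ≤ (nums.length : Int)) (j x : Int)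
    (s : List Int) (hj : 0 ≤ j)
    (h : List.drop j.toNat (List.take N.toNat nums) = x :: s) :
    PySem.List.pyGetD nums j 0 = x := by
  have hts : (List.take N.toNat nums)[j.toNat]? = some x := by
    have h0 : (List.drop j.toNat (List.take N.toNat nums))[0]? = some x := by rw [h]; rfl
    rw [List.getElem?_drop] at h0
    simpa using h0
  have hjlt : j.toNat < N.toNat := by
    have hlen := List.getElem?_eq_some_iff.mp hts
    have := hlen.choose_spec
    have h2 : j.toNat < (List.take N.toNat nums).length := hlen.choose
    rw [List.length_take] at h2
    omega
  have hnum : nums[j.toNat]? = some x := by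
    rw [← List.getElem?_take_of_lt hjlt]; exact hts
  rw [PySem.List.pyGetD_of_nonneg nums 0 hj, List.getD_eq_getElem?_getD, hnum]
  rfl

theorem pvLastAppend (xs : List Int) (v : Int) : PySem.List.pyGetD (xs ++ [v]) (-1) 0 = v := by
  simp [PySem.List.pyGetD, PySem.List.pyGet?, PySem.List.pyIdx?]

theorem pvBridgeB (nums : List Int) (N : Int) (h0 : 0 ≤ N) (hN : N ≤ (nums.length : Int)) :
    ∀ (s : List Int) (j total up down peak : Int), 1 ≤ j →
    List.drop j.toNat (List.take N.toNat nums) = s →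
    ((PySem.List.pyRange j N 1).foldl (offeringsStepB nums) (total, up, down, peak)).1
      = total + pvM up peak down (PySem.List.pyGetD nums (j - 1) 0) s := by
  intro s
  induction s with
  | nil =>
    intro j total up down peak hj hs
    have hd := List.drop_eq_nil_iff.mp hs
    rw [List.length_take] at hd
    have : N ≤ j := by omega
    rw [PySem.List.pyRange_one_eq_nil this]
    simp [pvM]
  | cons x s' ih =>
    intro j total up down peak hj hs
    have hx : PySem.List.pyGetD nums j 0 = x := pvNumsAt nums N hN j x s' (by omega) hs
    have hlen := congrArg List.length hs
    rw [List.length_drop, List.length_take] at hlen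
    simp only [List.length_cons] at hlen
    have hjN : j < N := by omega
    have hs' : List.drop (j + 1).toNat (List.take N.toNat nums) = s' :=
      pvDropSucc _ j (by omega) x s' hs
    have hj1 : j + 1 - 1 = j := by ring
    rw [PySem.List.pyRange_one_cons hjN, List.foldl_cons]
    rw [pvM]
    by_cases c1 : x > PySem.List.pyGetD nums (j - 1) 0
    · rw [if_pos c1]
      rw [show offeringsStepB nums (total, up, down, peak) j
          = (total + (1 + (up + 1)), up + 1, 0, up + 1) by
        simp only [offeringsStepB, hx]; rw [if_pos c1]]
      rw [ih (j + 1) _ _ _ _ (by omega) hs', hj1, hx]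
      ring
    · rw [if_neg c1]
      by_cases c2 : x = PySem.List.pyGetD nums (j - 1) 0
      · rw [if_pos c2]
        rw [show offeringsStepB nums (total, up, down, peak) j = (total + 1, 0, 0, 0) by
          simp only [offeringsStepB, hx]; rw [if_neg c1, if_pos c2]]
        rw [ih (j + 1) _ _ _ _ (by omega) hs', hj1, hx]
        ring
      · rw [if_neg c2]
        rw [show offeringsStepB nums (total, up, down, peak) j
            = (total + (1 + (down + 1) - (if peak ≥ down + 1 then 1 else 0)),
               0, down + 1, peak) by
          simp only [offeringsStepB, hx]; rw [if_neg c1, if_neg c2]]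
        rw [ih (j + 1) _ _ _ _ (by omega) hs', hj1, hx]
        ring

theorem pvBridgeA1 (nums : List Int) (N : Int) (h0 : 0 ≤ N) (hN : N ≤ (nums.length : Int)) :
    ∀ (s : List Int) (j : Int) (acc : List Int) (u : Int), 1 ≤ j →
    List.drop j.toNat (List.take N.toNat nums) = s →
    PySem.List.pyGetD acc (-1) 0 = u →
    (PySem.List.pyRange j N 1).foldl (offeringsStepA1 nums) acc
      = acc ++ pvIncs u (PySem.List.pyGetD nums (j - 1) 0) s := by
  intro s
  induction s with
  | nil =>
    intro j acc u hj hs _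
    have hd := List.drop_eq_nil_iff.mp hs
    rw [List.length_take] at hd
    have : N ≤ j := by omega
    rw [PySem.List.pyRange_one_eq_nil this]
    simp [pvIncs]
  | cons x s' ih =>
    intro j acc u hj hs hu
    have hx : PySem.List.pyGetD nums j 0 = x := pvNumsAt nums N hN j x s' (by omega) hs
    have hlen := congrArg List.length hs
    rw [List.length_drop, List.length_take] at hlen
    simp only [List.length_cons] at hlen
    have hjN : j < N := by omega
    have hs' : List.drop (j + 1).toNat (List.take N.toNat nums) = s' :=
      pvDropSucc _ j (by omega) x s' hs
    have hj1 : j + 1 - 1 = j := by ring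
    rw [PySem.List.pyRange_one_cons hjN, List.foldl_cons]
    rw [pvIncs]
    by_cases c1 : x > PySem.List.pyGetD nums (j - 1) 0
    · rw [if_pos c1]
      rw [show offeringsStepA1 nums acc j = acc ++ [u + 1] by
        simp only [offeringsStepA1, hx, hu]; rw [if_pos c1]]
      rw [ih (j + 1) (acc ++ [u + 1]) (u + 1) (by omega) hs' (pvLastAppend acc (u + 1)),
        hj1, hx, List.append_assoc]
      rfl
    · rw [if_neg c1]
      rw [show offeringsStepA1 nums acc j = acc ++ [0] by
        simp only [offeringsStepA1, hx, hu]; rw [if_neg c1]]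
      rw [ih (j + 1) (acc ++ [0]) 0 (by omega) hs' (pvLastAppend acc 0),
        hj1, hx, List.append_assoc]
      rfl

theorem pvBridgeA2 (nums : List Int) (N : Int) (h1 : 1 ≤ N) (hN : N ≤ (nums.length : Int))
    (ansFull : List Int) (hlen : ansFull.length = N.toNat) :
    ∀ (s' : List Int) (x j u p : Int), 0 ≤ j → 0 ≤ u →
    List.drop j.toNat (List.take N.toNat nums) = x :: s' →
    List.drop j.toNat ansFull = pvIncs u p (x :: s') →
    (PySem.List.pyRange j (N - 1) 1).foldr (fun x y => offeringsStepA2 nums y x) (ansFull, 0)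
      = (List.take j.toNat ansFull ++ pvFins u p (x :: s'),
         (pvFins u p (x :: s')).dropLast.sum + (s'.length : Int)) := by
  intro s'
  induction s' with
  | nil =>
    intro x j u p hj hu hs hdrop
    have ht : (List.take N.toNat nums).length = N.toNat := by rw [List.length_take]; omega
    have hlen2 := congrArg List.length hs
    rw [List.length_drop, ht] at hlen2
    simp only [List.length_cons, List.length_nil] at hlen2
    have hjeq : j = N - 1 := by omega
    subst hjeq
    rw [PySem.List.pyRange_one_eq_nil (le_refl (N - 1)), List.foldr_nil]
    have hu'0 : (0 : Int) ≤ if x > p then u + 1 else 0 := by split <;> omega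
    have hfx : pvFins u p [x] = [if x > p then u + 1 else 0] := by
      rw [pvFins, pvFins, pvDepth, max_eq_left hu'0]
    have hix : pvIncs u p [x] = [if x > p then u + 1 else 0] := by
      rw [pvIncs, pvIncs]
    simp only [Prod.mk.injEq]
    constructor
    · conv_lhs => rw [← List.take_append_drop (N - 1).toNat ansFull]
      rw [hdrop, hix, hfx]
    · rw [hfx]; simp
  | cons x₂ s'' ih =>
    intro x j u p hj hu hs hdrop
    have ht : (List.take N.toNat nums).length = N.toNat := by rw [List.length_take]; omega
    have hlen2 := congrArg List.length hs
    rw [List.length_drop, ht] at hlen2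
    simp only [List.length_cons] at hlen2
    have hjlt : j < N - 1 := by omega
    have hs2 : List.drop (j + 1).toNat (List.take N.toNat nums) = x₂ :: s'' :=
      pvDropSucc _ j hj x _ hs
    have hu'0 : (0 : Int) ≤ if x > p then u + 1 else 0 := by split <;> omega
    have hincs_cons : pvIncs u p (x :: x₂ :: s'')
        = (if x > p then u + 1 else 0) :: pvIncs (if x > p then u + 1 else 0) x (x₂ :: s'') := by
      rw [pvIncs]
    have hdrop2 : List.drop (j + 1).toNat ansFull
        = pvIncs (if x > p then u + 1 else 0) x (x₂ :: s'') :=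
      pvDropSucc ansFull j hj _ _ (by rw [hdrop, hincs_cons])
    have hAj : ansFull[j.toNat]? = some (if x > p then u + 1 else 0) := by
      have h0 : (List.drop j.toNat ansFull)[0]? = some (if x > p then u + 1 else 0) := by
        rw [hdrop, hincs_cons]; rfl
      rw [List.getElem?_drop] at h0
      simpa using h0
    have hx : PySem.List.pyGetD nums j 0 = x := pvNumsAt nums N hN j x _ hj hs
    have hx2 : PySem.List.pyGetD nums (j + 1) 0 = x₂ := pvNumsAt nums N hN (j + 1) x₂ s'' (by omega) hs2
    rw [PySem.List.pyRange_one_cons hjlt, List.foldr_cons]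
    rw [ih x₂ (j + 1) (if x > p then u + 1 else 0) x (by omega) hu'0 hs2 hdrop2]
    have htak : List.take (j + 1).toNat ansFull
        = List.take j.toNat ansFull ++ [if x > p then u + 1 else 0] := by
      have hn : (j + 1).toNat = j.toNat + 1 := by omega
      rw [hn, List.take_add_one, hAj]
      rfl
    have hlentake : (List.take j.toNat ansFull).length = j.toNat := by
      rw [List.length_take]; omega
    have hstate : List.take (j + 1).toNat ansFull ++ pvFins (if x > p then u + 1 else 0) x (x₂ :: s'')
        = List.take j.toNat ansFull
          ++ (if x > p then u + 1 else 0) :: pvFins (if x > p then u + 1 else 0) x (x₂ :: s'') := by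
      rw [htak, List.append_assoc]
      rfl
    have hread0 : ∀ (z : Int) (L : List Int),
        PySem.List.pyGetD (List.take j.toNat ansFull ++ z :: L) j 0 = z := by
      intro z L
      rw [PySem.List.pyGetD_of_nonneg _ 0 hj, List.getD_eq_getElem?_getD,
        List.getElem?_append_right (le_of_eq hlentake)]
      rw [hlentake]
      simp
    have hread1 : ∀ (z w : Int) (L : List Int),
        PySem.List.pyGetD (List.take j.toNat ansFull ++ z :: w :: L) (j + 1) 0 = w := by
      intro z w L
      have hn : (j + 1).toNat = j.toNat + 1 := by omega
      rw [PySem.List.pyGetD_of_nonneg _ 0 (by omega), List.getD_eq_getElem?_getD, hn,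
        List.getElem?_append_right (by rw [hlentake]; omega)]
      rw [hlentake]
      simp
    have hset : ∀ (v : Int) (z : Int) (L : List Int),
        PySem.List.pySetD (List.take j.toNat ansFull ++ z :: L) j v
          = List.take j.toNat ansFull ++ v :: L := by
      intro v z L
      rw [PySem.List.pySetD_of_nonneg _ _ hj, List.set_append]
      rw [hlentake]
      simp
    have hfins2 : pvFins (if x > p then u + 1 else 0) x (x₂ :: s'')
        = max (if x₂ > x then (if x > p then u + 1 else 0) + 1 else 0) (pvDepth x₂ s'')
          :: pvFins (if x₂ > x then (if x > p then u + 1 else 0) + 1 else 0) x₂ s'' := by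
      rw [pvFins]
    have hfins1 : pvFins u p (x :: x₂ :: s'')
        = max (if x > p then u + 1 else 0) (pvDepth x (x₂ :: s''))
          :: pvFins (if x > p then u + 1 else 0) x (x₂ :: s'') := by
      rw [pvFins]
    rw [hstate]
    simp only [offeringsStepA2, hx, hx2]
    by_cases c : x > x₂
    · have hnc : ¬ x₂ > x := by omega
      have hdep : pvDepth x (x₂ :: s'') = pvDepth x₂ s'' + 1 := by
        rw [pvDepth, if_pos (by omega : x₂ < x)]
      rw [if_pos c]
      rw [hread0, hfins2, hread1, hset]
      rw [hread0]
      rw [hfins1, hdep]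
      rw [hfins2]
      simp only [hnc, if_false, max_eq_right (pvDepth_nonneg s'' x₂), Prod.mk.injEq]
      constructor
      · trivial
      · rw [List.dropLast_cons₂, List.sum_cons]
        simp only [List.length_cons]
        push_cast
        ring
    · have hnc : ¬ x₂ < x := by omega
      have hdep : pvDepth x (x₂ :: s'') = 0 := by
        rw [pvDepth, if_neg hnc]
      rw [if_neg c]
      rw [hread0]
      rw [hfins1, hdep]
      have hmax : max (if x > p then u + 1 else 0) (0 : Int) = (if x > p then u + 1 else 0) :=
        max_eq_left hu'0
      rw [hmax]
      rw [hfins2]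
      simp only [Prod.mk.injEq]
      constructor
      · trivial
      · rw [List.dropLast_cons₂, List.sum_cons]
        simp only [List.length_cons]
        push_cast
        ring

theorem pvMain (N : Int) (nums : List Int) (h1 : 1 ≤ N) (hN : N ≤ (nums.length : Int)) :
    offerings N nums = offerings_alt N nums := by
  obtain ⟨h, r, hhr⟩ : ∃ h r, List.take N.toNat nums = h :: r := by
    cases e : List.take N.toNat nums with
    | nil =>
      have := congrArg List.length e
      rw [List.length_take] at this
      simp only [List.length_nil] at this
      omega
    | cons a b => exact ⟨a, b, rfl⟩
  have hlenhr := congrArg List.length hhr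
  rw [List.length_take] at hlenhr
  simp only [List.length_cons] at hlenhr
  have hh : PySem.List.pyGetD nums 0 0 = h := by
    have := pvNumsAt nums N hN 0 h r le_rfl (by simpa using hhr)
    simpa using this
  -- phase 1
  have hdrop1 : List.drop (1 : Int).toNat (List.take N.toNat nums) = r := by
    rw [show (1 : Int).toNat = 1 from rfl, hhr]
    rfl
  have e1 := pvBridgeA1 nums N (by omega) hN r 1 [0] 0 le_rfl hdrop1 rfl
  rw [show (1 : Int) - 1 = 0 from rfl, hh] at e1
  -- the full first-pass array
  have hAF : ([0] : List Int) ++ pvIncs 0 h r = pvIncs 0 h (h :: r) := by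
    rw [pvIncs, if_neg (lt_irrefl h)]
    rfl
  have hlenAF : (([0] : List Int) ++ pvIncs 0 h r).length = N.toNat := by
    rw [List.length_append, pvIncs_length]
    simp only [List.length_cons, List.length_nil]
    omega
  -- phase 2
  have e2 := pvBridgeA2 nums N h1 hN (([0] : List Int) ++ pvIncs 0 h r) hlenAF r h 0 0 h
    le_rfl le_rfl (by simpa using hhr) (by simpa using hAF)
  rw [show ((0 : Int)).toNat = 0 from rfl, List.take_zero, List.nil_append] at e2
  -- phase B
  have e3 := pvBridgeB nums N (by omega) hN r 1 1 0 0 0 le_rfl hdrop1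
  rw [show (1 : Int) - 1 = 0 from rfl, hh] at e3
  -- assemble
  rw [offerings, offerings_alt, e1, e3]
  rw [PySem.List.pyRange_neg_one_eq_reverse (N - 2) (-1),
    show (-1 : Int) + 1 = 0 from rfl, show N - 2 + 1 = N - 1 by ring,
    List.foldl_reverse, e2]
  -- final arithmetic
  have hFc : pvFins 0 h (h :: r) = max 0 (pvDepth h r) :: pvFins 0 h r := by
    rw [pvFins, if_neg (lt_irrefl h)]
  have hFlen : (pvFins 0 h (h :: r)).length = N.toNat := by
    rw [pvFins_length]
    simp
    omega
  have hFne : pvFins 0 h (h :: r) ≠ [] := by rw [hFc]; simp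
  have hidx : (N - 1).toNat = (pvFins 0 h (h :: r)).length - 1 := by rw [hFlen]; omega
  have hlast : PySem.List.pyGetD (pvFins 0 h (h :: r)) (N - 1) 0
      = (pvFins 0 h (h :: r)).getLast hFne := by
    rw [PySem.List.pyGetD_of_nonneg _ 0 (by omega), List.getD_eq_getElem?_getD, hidx,
      List.getElem?_eq_getElem (by rw [hFlen]; omega : (pvFins 0 h (h :: r)).length - 1 < (pvFins 0 h (h :: r)).length),
      Option.getD_some, List.getLast_eq_getElem]
  have hsum : (pvFins 0 h (h :: r)).dropLast.sum + (pvFins 0 h (h :: r)).getLast hFne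
      = (pvFins 0 h (h :: r)).sum := by
    conv_rhs => rw [← List.dropLast_append_getLast hFne]
    rw [List.sum_append]
    simp
  have hkey : pvM 0 0 0 h r = pvS 0 h r + max 0 (pvDepth h r) := by
    have := pvKey r 0 0 0 h le_rfl
    simpa using this
  have hSf := pvS_fins r 0 h
  have hsum2 : (pvFins 0 h (h :: r)).sum = max 0 (pvDepth h r) + (pvFins 0 h r).sum := by
    rw [hFc, List.sum_cons]
  rw [hlast]
  linarith [hsum, hkey, hSf, hsum2]

theorem offerings_spec : Claim_equal_offerings := by
  intro N nums _ hpre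
  obtain ⟨hN0, hor⟩ := hpre
  unfold Spec_offerings
  by_cases hbig : 1 ≤ N ∧ N ≤ (nums.length : Int)
  · exact pvMain N nums hbig.1 hbig.2
  · have hsml : N = 0 ∨ (N = 1 ∧ nums = []) := by
      rcases hor with hle | hle
      · left; omega
      · by_cases hz : N = 0
        · exact Or.inl hz
        · right
          have hN1 : N = 1 := by omega
          refine ⟨hN1, ?_⟩
          have : (nums.length : Int) < 1 := by omega
          have : nums.length = 0 := by omega
          exact List.eq_nil_of_length_eq_zero this
    rcases hsml with hz | ⟨hN1, hnil⟩
    · subst hz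
      rw [offerings, offerings_alt,
        PySem.List.pyRange_one_eq_nil (by omega : (0 : Int) ≤ 1),
        PySem.List.pyRange_neg_one_eq_nil (by omega : (0 : Int) - 2 ≤ -1)]
      rfl
    · subst hN1
      subst hnil
      rfl
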